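-- pv_equiv track=rewrite | github.com/xiaojiou176-open/OpenVibeCoding | apps/orchestrator/src/cortexpilot_orch/runners/agents_mcp_config.py | _filter_mcp_config
-- ===== SOURCE A (Python) =====
-- def _section_mcp_server_name(section: str) -> str | None:
--     if not section.startswith("mcp_servers."):
--         return None
--     remainder = section[len("mcp_servers.") :]
--     if not remainder:
--         return None
--     if remainder.startswith('"'):
--         end = remainder.find('"', 1)
--         if end <= 1:
--             return None
--         return remainder[1:end]
--     for idx, ch in enumerate(remainder):
--         if ch == ".":
--             return remainder[:idx]
--     return remainder
--
-- def _filter_mcp_config(config_text: str, allowed: set[str], include_non_mcp: bool = True) -> str: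
--     output: list[str] = []
--     keep = include_non_mcp
--     for raw in config_text.splitlines():
--         line = raw.strip()
--         if line.startswith("[") and line.endswith("]"):
--             section = line[1:-1].strip()
--             if section.startswith("mcp_servers."):
--                 name = _section_mcp_server_name(section)
--                 keep = bool(name and name in allowed)
--             else:
--                 keep = include_non_mcp
--         if keep:
--             output.append(raw)
--     return "\n".join(output) + "\n"
-- ===== SOURCE B (Python) =====
-- def _section_mcp_server_name(section: str) -> str | None:
--     if not section.startswith("mcp_servers."):
--         return None
--     remainder = section[len("mcp_servers.") :]
--     if not remainder:
--         return None
--     if remainder.startswith('"'):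
--         end = remainder.find('"', 1)
--         if end <= 1:
--             return None
--         return remainder[1:end]
--     for idx, ch in enumerate(remainder):
--         if ch == ".":
--             return remainder[:idx]
--     return remainder
--
--
-- def _is_header(raw: str) -> bool:
--     line = raw.strip()
--     return line.startswith("[") and line.endswith("]")
--
--
-- def _keep_block(block: list[str], allowed, include_non_mcp: bool) -> bool:
--     if not block or not _is_header(block[0]):
--         return include_non_mcp
--     section = block[0].strip()[1:-1].strip()
--     if section.startswith("mcp_servers."):
--         name = _section_mcp_server_name(section)
--         return bool(name and name in allowed)
--     return include_non_mcp
--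
--
-- def _split_blocks(lines: list[str]) -> list[list[str]]:
--     blocks: list[list[str]] = []
--     current: list[str] = []
--     for raw in lines:
--         if _is_header(raw):
--             blocks.append(current)
--             current = [raw]
--         else:
--             current.append(raw)
--     blocks.append(current)
--     return blocks
--
--
-- def _filter_mcp_config(config_text: str, allowed, include_non_mcp: bool = True) -> str:
--     kept = [
--         raw
--         for block in _split_blocks(config_text.splitlines())
--         if _keep_block(block, allowed, include_non_mcp)
--         for raw in block
--     ]
--     return "\n".join(kept) + "\n"
-- ===== Notes on version B (the rewrite author's own statement) =====
-- stated objective: alternative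
-- what changed: Replaces A's running keep-flag line loop by a block decomposition: split the lines into a preamble block plus one block per section header, decide keep once per block from its first line, and concatenate the kept blocks.
import Mathlib
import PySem

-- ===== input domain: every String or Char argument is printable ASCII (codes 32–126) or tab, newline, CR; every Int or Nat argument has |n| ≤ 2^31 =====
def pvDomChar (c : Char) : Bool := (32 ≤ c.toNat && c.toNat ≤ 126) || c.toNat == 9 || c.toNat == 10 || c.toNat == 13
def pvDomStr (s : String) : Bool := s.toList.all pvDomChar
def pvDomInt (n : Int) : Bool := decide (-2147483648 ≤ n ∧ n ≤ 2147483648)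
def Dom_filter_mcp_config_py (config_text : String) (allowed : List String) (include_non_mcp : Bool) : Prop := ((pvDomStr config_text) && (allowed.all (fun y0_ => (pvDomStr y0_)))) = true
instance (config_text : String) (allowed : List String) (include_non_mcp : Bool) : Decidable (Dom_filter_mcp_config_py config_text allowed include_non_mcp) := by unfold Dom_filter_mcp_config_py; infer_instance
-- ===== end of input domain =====

-- B replaces A's running keep-flag line loop by a split-into-blocks / decide-per-block / concatenate decomposition (alternative, same cost).

-- ===== PORT A =====
-- _section_mcp_server_name, shared verbatim by both Python versions (B keeps the helper unchanged)
def sectionNameLoop (remainder : List Char) : List (Int × Char) → Option (List Char)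
  | [] => some remainder
  | (idx, ch) :: rest =>
    if ch = '.' then some (PySem.Chars.slice remainder none (some idx))
    else sectionNameLoop remainder rest

def sectionMcpServerName (sect : List Char) : Option (List Char) :=
  if ¬ (PySem.Chars.startswith sect "mcp_servers.".toList) then none
  else
    let remainder := PySem.Chars.slice sect (some ((12 : Nat) : Int)) none
    if remainder = [] then none
    else if PySem.Chars.startswith remainder ['"'] then
      let e := PySem.Chars.findFrom remainder ['"'] 1 none
      if e ≤ 1 then none
      else some (PySem.Chars.slice remainder (some 1) (some e))
    else sectionNameLoop remainder (PySem.List.enumerate remainder)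

def filter_mcp_config_py (config_text : String) (allowed : List String) (include_non_mcp : Bool) : String :=
  let st := (PySem.Str.splitlines config_text).foldl (init := (([] : List String), include_non_mcp))
    (fun st raw =>
      let line := PySem.Chars.strip raw.toList
      let keep :=
        if PySem.Chars.startswith line ['['] && PySem.Chars.endswith line [']'] then
          let sec := PySem.Chars.strip (PySem.Chars.slice line (some 1) (some (-1)))
          if PySem.Chars.startswith sec "mcp_servers.".toList then
            match sectionMcpServerName sec with
            | none => false
            | some n => !n.isEmpty && allowed.any (fun a => a.toList == n)
          else include_non_mcp
        else st.2
      (if keep then st.1 ++ [raw] else st.1, keep))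
  PySem.Str.join "\n" st.1 ++ "\n"

-- ===== PORT B =====
def isHeaderB (raw : String) : Bool :=
  let line := PySem.Chars.strip raw.toList
  PySem.Chars.startswith line ['['] && PySem.Chars.endswith line [']']

def keepBlockB (allowed : List String) (include_non_mcp : Bool) (block : List String) : Bool :=
  match block with
  | [] => include_non_mcp
  | h :: _ =>
    if !isHeaderB h then include_non_mcp
    else
      let sec := PySem.Chars.strip (PySem.Chars.slice (PySem.Chars.strip h.toList) (some 1) (some (-1)))
      if PySem.Chars.startswith sec "mcp_servers.".toList then
        match sectionMcpServerName sec with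
        | none => false
        | some n => !n.isEmpty && allowed.any (fun a => a.toList == n)
      else include_non_mcp

def splitBlocksB (lines : List String) : List (List String) :=
  let st := lines.foldl (init := (([] : List (List String)), ([] : List String)))
    (fun st raw => if isHeaderB raw then (st.1 ++ [st.2], [raw]) else (st.1, st.2 ++ [raw]))
  st.1 ++ [st.2]

def filter_mcp_config_py_alt (config_text : String) (allowed : List String) (include_non_mcp : Bool) : String :=
  let kept := (splitBlocksB (PySem.Str.splitlines config_text)).foldr
    (fun block acc => if keepBlockB allowed include_non_mcp block then block ++ acc else acc) []
  PySem.Str.join "\n" kept ++ "\n"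

-- ===== PRECONDITION & SPEC =====
def Spec_filter_mcp_config_py (config_text : String) (allowed : List String) (include_non_mcp : Bool) (out : String) : Prop := out = filter_mcp_config_py_alt config_text allowed include_non_mcp
instance (config_text : String) (allowed : List String) (include_non_mcp : Bool) (out : String) : Decidable (Spec_filter_mcp_config_py config_text allowed include_non_mcp out) := by unfold Spec_filter_mcp_config_py; infer_instance

-- ===== CLAIM (what is proved, stated in full; the proofs are below) =====
def Claim_equal_filter_mcp_config_py : Prop := ∀ (config_text : String) (allowed : List String) (include_non_mcp : Bool), Dom_filter_mcp_config_py config_text allowed include_non_mcp → Spec_filter_mcp_config_py config_text allowed include_non_mcp (filter_mcp_config_py config_text allowed include_non_mcp)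

-- ===== LEMMAS AND PROOFS =====

-- the decision A makes on a header line raw
def decHdr (allowed : List String) (include_non_mcp : Bool) (raw : String) : Bool :=
  let sec := PySem.Chars.strip (PySem.Chars.slice (PySem.Chars.strip raw.toList) (some 1) (some (-1)))
  if PySem.Chars.startswith sec "mcp_servers.".toList then
    match sectionMcpServerName sec with
    | none => false
    | some n => !n.isEmpty && allowed.any (fun a => a.toList == n)
  else include_non_mcp

-- A's loop body, named (definitionally equal to the lambda in the port)
def stepA (allowed : List String) (include_non_mcp : Bool) (st : List String × Bool) (raw : String) : List String × Bool :=
  let line := PySem.Chars.strip raw.toList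
  let keep :=
    if PySem.Chars.startswith line ['['] && PySem.Chars.endswith line [']'] then
      let sec := PySem.Chars.strip (PySem.Chars.slice line (some 1) (some (-1)))
      if PySem.Chars.startswith sec "mcp_servers.".toList then
        match sectionMcpServerName sec with
        | none => false
        | some n => !n.isEmpty && allowed.any (fun a => a.toList == n)
      else include_non_mcp
    else st.2
  (if keep then st.1 ++ [raw] else st.1, keep)

theorem stepA_eq (allowed : List String) (include_non_mcp : Bool)
    (st : List String × Bool) (raw : String) :
    stepA allowed include_non_mcp st raw
      = (if (if isHeaderB raw then decHdr allowed include_non_mcp raw else st.2)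
          then st.1 ++ [raw] else st.1,
         if isHeaderB raw then decHdr allowed include_non_mcp raw else st.2) := rfl

-- A's loop as a pure recursion producing only the kept lines
def gA (allowed : List String) (include_non_mcp : Bool) : List String → Bool → List String
  | [], _ => []
  | raw :: rest, k =>
    let k' := if isHeaderB raw then decHdr allowed include_non_mcp raw else k
    (if k' then [raw] else []) ++ gA allowed include_non_mcp rest k'

theorem foldlA_eq_gA (allowed : List String) (include_non_mcp : Bool) :
    ∀ (ls : List String) (acc : List String) (k : Bool),
      (ls.foldl (stepA allowed include_non_mcp) (acc, k)).1
        = acc ++ gA allowed include_non_mcp ls k := by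
  intro ls
  induction ls with
  | nil => intro acc k; simp only [List.foldl_nil, gA, List.append_nil]
  | cons raw rest ih =>
    intro acc k
    simp only [List.foldl_cons, stepA_eq, gA]
    cases hH : (if isHeaderB raw then decHdr allowed include_non_mcp raw else k) with
    | false =>
      simp only [Bool.false_eq_true, if_false, ih, List.nil_append]
    | true =>
      simp only [eq_self_iff_true, if_true, ih, List.append_assoc, List.singleton_append]

-- B's splitter as a pure recursion
def splitRec : List String → List String → List (List String)
  | [], cur => [cur]
  | raw :: rest, cur =>
    if isHeaderB raw then cur :: splitRec rest [raw] else splitRec rest (cur ++ [raw])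

theorem foldlB_eq_splitRec :
    ∀ (ls : List String) (blocks : List (List String)) (cur : List String),
      ((ls.foldl
        (fun (st : List (List String) × List String) raw =>
          if isHeaderB raw then (st.1 ++ [st.2], [raw]) else (st.1, st.2 ++ [raw])) (blocks, cur)).1
       ++ [(ls.foldl
        (fun (st : List (List String) × List String) raw =>
          if isHeaderB raw then (st.1 ++ [st.2], [raw]) else (st.1, st.2 ++ [raw])) (blocks, cur)).2])
      = blocks ++ splitRec ls cur := by
  intro ls
  induction ls with
  | nil => intro blocks cur; simp only [List.foldl_nil, splitRec]
  | cons raw rest ih =>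
    intro blocks cur
    simp only [List.foldl_cons, splitRec]
    cases hH : isHeaderB raw with
    | false =>
      simp only [Bool.false_eq_true, if_false, ih]
    | true =>
      simp only [eq_self_iff_true, if_true, ih, List.append_assoc, List.singleton_append]

def flatKept (allowed : List String) (include_non_mcp : Bool) (bs : List (List String)) : List String :=
  bs.foldr (fun block acc => if keepBlockB allowed include_non_mcp block then block ++ acc else acc) []

theorem keepBlockB_singleton_header (allowed : List String) (include_non_mcp : Bool)
    (raw : String) (h : isHeaderB raw = true) :
    keepBlockB allowed include_non_mcp [raw] = decHdr allowed include_non_mcp raw := by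
  have h0 : keepBlockB allowed include_non_mcp [raw]
      = if !isHeaderB raw then include_non_mcp else decHdr allowed include_non_mcp raw := rfl
  rw [h0, h]
  simp only [Bool.not_true, Bool.false_eq_true, if_false]

theorem keepBlockB_append_nonheader (allowed : List String) (include_non_mcp : Bool)
    (cur : List String) (raw : String) (h : isHeaderB raw = false) :
    keepBlockB allowed include_non_mcp (cur ++ [raw]) = keepBlockB allowed include_non_mcp cur := by
  cases cur with
  | nil =>
    have h0 : keepBlockB allowed include_non_mcp ([] ++ [raw])
        = if !isHeaderB raw then include_non_mcp else decHdr allowed include_non_mcp raw := rfl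
    rw [h0, h]
    simp only [Bool.not_false, if_true]
    rfl
  | cons x xs => rfl

theorem flatKept_cons (allowed : List String) (include_non_mcp : Bool)
    (b : List String) (bs : List (List String)) :
    flatKept allowed include_non_mcp (b :: bs)
      = (if keepBlockB allowed include_non_mcp b then b else [])
        ++ flatKept allowed include_non_mcp bs := by
  simp only [flatKept, List.foldr_cons]
  cases hk : keepBlockB allowed include_non_mcp b with
  | false => simp only [Bool.false_eq_true, if_false, List.nil_append]
  | true => simp only [eq_self_iff_true, if_true]

theorem flatKept_nil (allowed : List String) (include_non_mcp : Bool) :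
    flatKept allowed include_non_mcp [] = [] := rfl

theorem flatKept_splitRec (allowed : List String) (include_non_mcp : Bool) :
    ∀ (ls : List String) (cur : List String),
      flatKept allowed include_non_mcp (splitRec ls cur)
        = (if keepBlockB allowed include_non_mcp cur then cur else [])
          ++ gA allowed include_non_mcp ls (keepBlockB allowed include_non_mcp cur) := by
  intro ls
  induction ls with
  | nil =>
    intro cur
    simp only [splitRec, gA, List.append_nil]
    rw [flatKept_cons, flatKept_nil, List.append_nil]
  | cons raw rest ih =>
    intro cur
    simp only [splitRec, gA]
    cases hH : isHeaderB raw with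
    | true =>
      simp only [eq_self_iff_true, if_true]
      rw [flatKept_cons, ih, keepBlockB_singleton_header allowed include_non_mcp raw hH]
    | false =>
      simp only [Bool.false_eq_true, if_false]
      rw [ih, keepBlockB_append_nonheader allowed include_non_mcp cur raw hH]
      cases hk : keepBlockB allowed include_non_mcp cur with
      | false =>
        simp only [Bool.false_eq_true, if_false, List.nil_append]
      | true =>
        simp only [eq_self_iff_true, if_true, List.append_assoc, List.singleton_append]

theorem keepBlockB_nil (allowed : List String) (include_non_mcp : Bool) :
    keepBlockB allowed include_non_mcp [] = include_non_mcp := rfl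

-- ===== VERDICT (by name: the statement is the Claim_ definition above) =====
theorem filter_mcp_config_py_spec : Claim_equal_filter_mcp_config_py := by
  intro config_text allowed include_non_mcp _
  show filter_mcp_config_py config_text allowed include_non_mcp
      = filter_mcp_config_py_alt config_text allowed include_non_mcp
  have hA : filter_mcp_config_py config_text allowed include_non_mcp
      = PySem.Str.join "\n"
          (((PySem.Str.splitlines config_text).foldl (stepA allowed include_non_mcp)
            ([], include_non_mcp)).1) ++ "\n" := rfl
  have hS : splitBlocksB (PySem.Str.splitlines config_text)
      = splitRec (PySem.Str.splitlines config_text) [] := by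
    have h := foldlB_eq_splitRec (PySem.Str.splitlines config_text) [] []
    rw [List.nil_append] at h
    exact h
  have hB : filter_mcp_config_py_alt config_text allowed include_non_mcp
      = PySem.Str.join "\n"
          (flatKept allowed include_non_mcp (splitRec (PySem.Str.splitlines config_text) [])) ++ "\n" := by
    unfold filter_mcp_config_py_alt flatKept
    rw [hS]
  rw [hA, hB, foldlA_eq_gA allowed include_non_mcp _ [] include_non_mcp,
    flatKept_splitRec allowed include_non_mcp _ [], keepBlockB_nil, List.nil_append]
  cases include_non_mcp <;> simp
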